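-- pv_equiv track=rewrite | github.com/gregsadler/my_butterfly | dataset.py | _build_part_index
-- ===== SOURCE A (Python) =====
-- def _build_part_index(data, class_id, part_id):
--     part_index = {}
--     ii = 0
--     all_data = []
--     for i, entry in enumerate(data):
--         _,_, partlist = entry
--         for spec, img_id, part_str in partlist:
--             fname = '{}/{}-{}.png'.format(spec, img_id, part_str)
--             cid, pid = class_id[spec], part_id[part_str]
--             all_data.append((cid, pid, fname))
--
--             if cid not in part_index:
--                 part_index[cid] = {}
--             if pid not in part_index[cid]:
--                 part_index[cid][pid] = []
--             part_index[cid][pid].append(ii)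
--             ii += 1
--
--     return all_data, part_index
-- ===== SOURCE B (Python) =====
-- def _build_part_index(data, class_id, part_id):
--     # Flat row list as a single comprehension.
--     all_data = [(class_id[spec], part_id[part_str],
--                  '{}/{}-{}.png'.format(spec, img_id, part_str))
--                 for _, _, partlist in data
--                 for spec, img_id, part_str in partlist]
--     # Group-by-filtering: keys in first-occurrence order via dict.fromkeys,
--     # index lists gathered by scanning the flat list per (cid, pid) group.
--     part_index = {
--         c: {p: [i for i, (c2, p2, _) in enumerate(all_data) if (c2, p2) == (c, p)]
--             for p in dict.fromkeys(p2 for c2, p2, _ in all_data if c2 == c)}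
--         for c in dict.fromkeys(c for c, _, _ in all_data)}
--     return all_data, part_index
-- ===== Notes on version B (the rewrite author's own statement) =====
-- stated objective: alternative
-- what changed: A builds all_data and the nested part_index interleaved in one mutating loop with a manual counter ii and membership guards; B builds all_data as one comprehension and then constructs part_index by group-by-filtering: dict.fromkeys gives the class/part keys in first-occurrence order and each index list is gathered by a separate scan of enumerate(all_data), with no dict mutation at all.
import Mathlib
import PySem

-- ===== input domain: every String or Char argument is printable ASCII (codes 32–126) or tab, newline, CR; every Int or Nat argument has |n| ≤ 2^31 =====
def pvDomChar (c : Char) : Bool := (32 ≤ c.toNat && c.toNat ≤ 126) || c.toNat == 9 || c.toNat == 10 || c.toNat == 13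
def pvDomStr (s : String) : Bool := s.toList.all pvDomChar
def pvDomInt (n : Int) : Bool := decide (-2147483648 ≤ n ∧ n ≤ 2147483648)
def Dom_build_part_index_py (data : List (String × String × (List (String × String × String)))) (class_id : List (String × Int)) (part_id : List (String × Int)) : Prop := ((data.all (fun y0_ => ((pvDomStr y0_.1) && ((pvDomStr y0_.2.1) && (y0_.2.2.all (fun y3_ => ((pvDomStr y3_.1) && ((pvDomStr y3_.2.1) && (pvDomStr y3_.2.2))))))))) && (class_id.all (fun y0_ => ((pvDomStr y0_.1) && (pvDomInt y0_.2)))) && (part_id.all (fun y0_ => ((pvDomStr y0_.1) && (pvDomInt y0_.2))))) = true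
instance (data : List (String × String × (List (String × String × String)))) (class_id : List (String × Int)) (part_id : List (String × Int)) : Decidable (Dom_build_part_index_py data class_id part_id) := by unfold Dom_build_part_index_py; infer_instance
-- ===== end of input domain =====

-- B replaces A's single mutating loop (manual counter ii, membership guards) by a comprehension for
-- all_data plus a group-by-filtering construction of part_index (dedup'd keys, one scan per group);
-- objective: alternative (no dict mutation; more scans, same results).


-- ===== PORT A =====
-- fname = '{}/{}-{}.png'.format(spec, img_id, part_str); the same format string appears in A and in B
def pvFname (spec img_id part_str : String) : String :=
  spec ++ "/" ++ img_id ++ "-" ++ part_str ++ ".png"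

-- body of A's inner loop; state = (part_index, ii, all_data).
-- class_id[spec] / part_id[part_str]: Pre_ guarantees get? = some, so getD's default is never used
-- (Python raises KeyError exactly where get? is none; those inputs are excluded by Pre_).
def pvAstep (cdict pdict : PySem.Dict String Int)
    (st : PySem.Dict Int (PySem.Dict Int (List Int)) × Int × List (Int × Int × String))
    (item : String × String × String) :
    PySem.Dict Int (PySem.Dict Int (List Int)) × Int × List (Int × Int × String) :=
  let (part_index, ii, all_data) := st
  let fname := pvFname item.1 item.2.1 item.2.2
  let cid := (cdict.get? item.1).getD 0
  let pid := (pdict.get? item.2.2).getD 0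
  let all_data := all_data ++ [(cid, pid, fname)]
  let part_index := if part_index.contains cid then part_index else part_index.insert cid PySem.Dict.empty
  let inner := part_index.getD cid PySem.Dict.empty
  let inner := if inner.contains pid then inner else inner.insert pid []
  let inner := inner.modify pid [] (fun l => l ++ [ii])
  let part_index := part_index.insert cid inner
  (part_index, ii + 1, all_data)

def build_part_index_py (data : List (String × String × (List (String × String × String)))) (class_id : List (String × Int)) (part_id : List (String × Int)) : (List (Int × Int × String)) × (List (Int × List (Int × List Int))) :=
  let cdict := PySem.Dict.ofList class_id
  let pdict := PySem.Dict.ofList part_id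
  let st := data.foldl (fun st entry => entry.2.2.foldl (pvAstep cdict pdict) st)
    ((PySem.Dict.empty : PySem.Dict Int (PySem.Dict Int (List Int))), (0 : Int), ([] : List (Int × Int × String)))
  (st.2.2, st.1.items.map (fun p => (p.1, p.2.items)))

-- ===== PORT B =====
-- one row of B's all_data comprehension
def pvRowB (cdict pdict : PySem.Dict String Int) (item : String × String × String) : Int × Int × String :=
  ((cdict.get? item.1).getD 0, (pdict.get? item.2.2).getD 0, pvFname item.1 item.2.1 item.2.2)

def build_part_index_py_alt (data : List (String × String × (List (String × String × String)))) (class_id : List (String × Int)) (part_id : List (String × Int)) : (List (Int × Int × String)) × (List (Int × List (Int × List Int))) :=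
  let cdict := PySem.Dict.ofList class_id
  let pdict := PySem.Dict.ofList part_id
  -- all_data = [... for _, _, partlist in data for spec, img_id, part_str in partlist]
  let all_data := data.flatMap (fun e => e.2.2.map (pvRowB cdict pdict))
  -- {c: {p: [i for i,(c2,p2,_) in enumerate(all_data) if (c2,p2)==(c,p)]
  --      for p in dict.fromkeys(p2 for c2,p2,_ in all_data if c2 == c)}
  --  for c in dict.fromkeys(c for c,_,_ in all_data)}
  let part_index :=
    (PySem.List.dedup (all_data.map (fun r => r.1))).map (fun c =>
      (c, (PySem.List.dedup ((all_data.filter (fun r => r.1 == c)).map (fun r => r.2.1))).map (fun p =>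
        (p, ((PySem.List.enumerate all_data).filter (fun ip => ip.2.1 == c && ip.2.2.1 == p)).map (fun ip => ip.1)))))
  (all_data, part_index)

-- ===== PRECONDITION & SPEC =====
-- Pre_ excludes exactly the inputs where Python's A raises KeyError: some spec / part_str of a
-- partlist entry is not a key of class_id / part_id.
def Pre_build_part_index_py (data : List (String × String × (List (String × String × String)))) (class_id : List (String × Int)) (part_id : List (String × Int)) : Prop :=
  ∀ e ∈ data, ∀ it ∈ e.2.2, it.1 ∈ class_id.map Prod.fst ∧ it.2.2 ∈ part_id.map Prod.fst
instance (data : List (String × String × (List (String × String × String)))) (class_id : List (String × Int)) (part_id : List (String × Int)) : Decidable (Pre_build_part_index_py data class_id part_id) := by unfold Pre_build_part_index_py; infer_instance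

def pvWitness_build_part_index_py : (List (String × String × (List (String × String × String)))) × (List (String × Int)) × (List (String × Int)) :=
  ([("a", "b", [("sp", "im", "pt")])], [("sp", 1)], [("pt", 2)])

def Spec_build_part_index_py (data : List (String × String × (List (String × String × String)))) (class_id : List (String × Int)) (part_id : List (String × Int)) (out : (List (Int × Int × String)) × (List (Int × List (Int × List Int)))) : Prop := out = build_part_index_py_alt data class_id part_id
instance (data : List (String × String × (List (String × String × String)))) (class_id : List (String × Int)) (part_id : List (String × Int)) (out : (List (Int × Int × String)) × (List (Int × List (Int × List Int)))) : Decidable (Spec_build_part_index_py data class_id part_id out) := by unfold Spec_build_part_index_py; infer_instance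

-- ===== CLAIM (what is proved, stated in full; the proofs are below) =====
def Claim_equal_build_part_index_py : Prop := ∀ (data : List (String × String × (List (String × String × String)))) (class_id : List (String × Int)) (part_id : List (String × Int)), Dom_build_part_index_py data class_id part_id → Pre_build_part_index_py data class_id part_id → Spec_build_part_index_py data class_id part_id (build_part_index_py data class_id part_id)

-- ===== LEMMAS AND PROOFS =====

-- the dict-update step of A's loop, isolated (proof-side only)
def pvBindex (pi : PySem.Dict Int (PySem.Dict Int (List Int)))
    (ip : Int × (Int × Int × String)) : PySem.Dict Int (PySem.Dict Int (List Int)) :=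
  pi.modify ip.2.1 PySem.Dict.empty (fun d => d.modify ip.2.2.1 [] (fun l => l ++ [ip.1]))

-- A's guarded inner-dict update equals a plain modify
lemma pvInner_eq (d : PySem.Dict Int (List Int)) (p i : Int) :
    (if d.contains p then d else d.insert p ([] : List Int)).modify p [] (fun l => l ++ [i])
      = d.modify p [] (fun l => l ++ [i]) := by
  by_cases h : d.contains p = true
  · simp [h]
  · simp only [Bool.not_eq_true] at h
    simp [h, PySem.Dict.modify, PySem.Dict.getD_insert_self, PySem.Dict.insert_insert_self,
      PySem.Dict.getD_of_not_contains _ _ h]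

-- A's guarded outer update equals the pvBindex step
lemma pvStepPI_eq (pi : PySem.Dict Int (PySem.Dict Int (List Int))) (c p i : Int) (rest : String) :
    (if pi.contains c then pi else pi.insert c PySem.Dict.empty).insert c
      ((if ((if pi.contains c then pi else pi.insert c PySem.Dict.empty).getD c PySem.Dict.empty).contains p
          then (if pi.contains c then pi else pi.insert c PySem.Dict.empty).getD c PySem.Dict.empty
          else ((if pi.contains c then pi else pi.insert c PySem.Dict.empty).getD c PySem.Dict.empty).insert p ([] : List Int)).modify
        p [] (fun l => l ++ [i]))
      = pvBindex pi (i, (c, p, rest)) := by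
  have hc := pvInner_eq (pi.getD c PySem.Dict.empty) p i
  by_cases h : pi.contains c = true
  · simp only [h, if_true, pvBindex, PySem.Dict.modify] at *
    rw [hc]
  · simp only [Bool.not_eq_true] at h
    have he := pvInner_eq (PySem.Dict.empty : PySem.Dict Int (List Int)) p i
    simp only [h, if_neg Bool.false_ne_true, pvBindex, PySem.Dict.modify,
      PySem.Dict.getD_insert_self, PySem.Dict.insert_insert_self,
      PySem.Dict.getD_of_not_contains _ _ h] at *
    rw [he]

-- invariant for A's inner loop over one partlist
lemma pvLoopA_inner (cdict pdict : PySem.Dict String Int) (l : List (String × String × String)) :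
    ∀ (pi : PySem.Dict Int (PySem.Dict Int (List Int))) (ad : List (Int × Int × String)),
    l.foldl (pvAstep cdict pdict) (pi, (ad.length : Int), ad)
      = ((PySem.List.enumerate (l.map (pvRowB cdict pdict)) (ad.length : Int)).foldl pvBindex pi,
         ((ad.length + l.length : Nat) : Int),
         ad ++ l.map (pvRowB cdict pdict)) := by
  induction l with
  | nil => intro pi ad; simp
  | cons x t ih =>
    intro pi ad
    have hstep : pvAstep cdict pdict (pi, (ad.length : Int), ad) x
        = (pvBindex pi ((ad.length : Int), pvRowB cdict pdict x), ((ad.length : Int) + 1),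
           ad ++ [pvRowB cdict pdict x]) := by
      simp only [pvAstep, pvRowB]
      rw [pvStepPI_eq pi ((cdict.get? x.1).getD 0) ((pdict.get? x.2.2).getD 0)
        ((ad.length : Int)) (pvFname x.1 x.2.1 x.2.2)]
    have hcast : ((ad.length : Int) + 1) = (((ad ++ [pvRowB cdict pdict x]).length : Nat) : Int) := by
      simp
    simp only [List.foldl_cons, hstep, hcast, ih]
    simp only [List.map_cons, PySem.List.enumerate_cons, List.foldl_cons, Prod.ext_iff]
    refine ⟨?_, ?_, by simp⟩
    · have : ((ad ++ [pvRowB cdict pdict x]).length : Int) = (ad.length : Int) + 1 := by simp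
      rw [this]
    · simp; omega

-- invariant for A's full nested loop over data
lemma pvLoopA_outer (cdict pdict : PySem.Dict String Int)
    (ds : List (String × String × (List (String × String × String)))) :
    ∀ (pi : PySem.Dict Int (PySem.Dict Int (List Int))) (ad : List (Int × Int × String)),
    ds.foldl (fun st e => e.2.2.foldl (pvAstep cdict pdict) st) (pi, (ad.length : Int), ad)
      = ((PySem.List.enumerate (ds.flatMap (fun e => e.2.2.map (pvRowB cdict pdict))) (ad.length : Int)).foldl pvBindex pi,
         ((ad.length + (ds.flatMap (fun e => e.2.2.map (pvRowB cdict pdict))).length : Nat) : Int),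
         ad ++ ds.flatMap (fun e => e.2.2.map (pvRowB cdict pdict))) := by
  induction ds with
  | nil => intro pi ad; simp
  | cons e ds ih =>
    intro pi ad
    simp only [List.foldl_cons, pvLoopA_inner cdict pdict e.2.2 pi ad]
    have hlen : ((ad.length + e.2.2.length : Nat) : Int)
        = (((ad ++ e.2.2.map (pvRowB cdict pdict)).length : Nat) : Int) := by simp
    rw [hlen, ih]
    simp only [List.flatMap_cons, PySem.List.enumerate_append, List.foldl_append, Prod.ext_iff]
    refine ⟨?_, ?_, by simp⟩
    · have : (((ad ++ e.2.2.map (pvRowB cdict pdict)).length : Nat) : Int)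
          = (ad.length : Int) + ((e.2.2.map (pvRowB cdict pdict)).length : Int) := by simp
      rw [this]
    · simp; omega

-- the c-slot of the fold of pvBindex is itself a modify-append fold over the c-rows
lemma pvGetD_fold (E : List (Int × (Int × Int × String))) :
    ∀ (pi : PySem.Dict Int (PySem.Dict Int (List Int))) (c : Int),
    (E.foldl pvBindex pi).getD c PySem.Dict.empty
      = (((E.filter (fun ip => ip.2.1 == c)).map (fun ip => (ip.2.2.1, ip.1))).foldl
          (fun d p => d.modify p.1 [] (fun x => x ++ [p.2])) (pi.getD c PySem.Dict.empty)) := by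
  induction E with
  | nil => intro pi c; simp
  | cons ip E ih =>
    intro pi c
    by_cases h : c = ip.2.1
    · subst h
      simp only [List.foldl_cons, List.filter_cons, beq_self_eq_true, if_true, List.map_cons,
        ih, pvBindex, PySem.Dict.getD_modify_self]
    · have hb : (ip.2.1 == c) = false := by simp [Ne.symm h]
      simp only [List.foldl_cons, List.filter_cons, hb, Bool.false_eq_true, if_false, ih,
        pvBindex, PySem.Dict.getD_modify, if_neg h]

-- filtering/projecting enumerate by a predicate/function of the element only
lemma pvEnumFilterMap {α β : Type} (q : α → Bool) (g : α → β) (xs : List α) :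
    ∀ (s : Int),
    ((PySem.List.enumerate xs s).filter (fun ip => q ip.2)).map (fun ip => g ip.2)
      = (xs.filter q).map g := by
  induction xs with
  | nil => intro s; simp
  | cons x xs ih =>
    intro s
    by_cases h : q x
    · simp [PySem.List.enumerate_cons, h, ih]
    · simp only [Bool.not_eq_true] at h
      simp [PySem.List.enumerate_cons, h, ih]

-- inner dicts: a modify-append fold from empty, rendered as items, is a group-by of its pair list
lemma pvInnerItems (L : List (Int × Int)) :
    (L.foldl (fun d p => d.modify p.1 [] (fun x => x ++ [p.2])) (PySem.Dict.empty : PySem.Dict Int (List Int))).items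
      = (PySem.List.dedup (L.map Prod.fst)).map (fun p => (p, (L.filter (fun q => q.1 == p)).map (fun q => q.2))) := by
  have hnd := PySem.Dict.nodup_keys_foldl_modify_key L Prod.fst ([] : List Int)
    (fun _ p => fun x => x ++ [p.2]) PySem.Dict.empty (by simp)
  have hk := PySem.Dict.keys_foldl_modify_key L Prod.fst ([] : List Int)
    (fun _ p => fun x => x ++ [p.2]) PySem.Dict.empty
  rw [PySem.Dict.items_eq_map_keys _ hnd ([] : List Int)]
  rw [hk]
  simp only [PySem.Set.update_nil_left, PySem.Dict.keys_empty]
  rw [← PySem.List.dedup_eq_ofList]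
  apply List.map_congr_left
  intro p _
  rw [PySem.Dict.getD_foldl_modify_append]
  simp

-- A's dict, rendered as nested item lists, is B's group-by-filtering structure
lemma pvIndex_eq (rows : List (Int × Int × String)) :
    ((PySem.List.enumerate rows 0).foldl pvBindex PySem.Dict.empty).items.map (fun p => (p.1, p.2.items))
      = (PySem.List.dedup (rows.map (fun r => r.1))).map (fun c =>
          (c, (PySem.List.dedup ((rows.filter (fun r => r.1 == c)).map (fun r => r.2.1))).map (fun p =>
            (p, ((PySem.List.enumerate rows 0).filter (fun ip => ip.2.1 == c && ip.2.2.1 == p)).map (fun ip => ip.1))))) := by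
  set E := PySem.List.enumerate rows 0 with hE
  have hnd := PySem.Dict.nodup_keys_foldl_modify_key E (fun ip => ip.2.1) (PySem.Dict.empty)
    (fun _ ip => fun d => d.modify ip.2.2.1 [] (fun l => l ++ [ip.1])) PySem.Dict.empty (by simp)
  have hk := PySem.Dict.keys_foldl_modify_key E (fun ip => ip.2.1) (PySem.Dict.empty)
    (fun _ ip => fun d => d.modify ip.2.2.1 [] (fun l => l ++ [ip.1])) PySem.Dict.empty
  have hkeys : (List.foldl pvBindex PySem.Dict.empty E).keys
      = PySem.List.dedup (E.map (fun ip => ip.2.1)) := by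
    rw [PySem.List.dedup_eq_ofList]
    rw [PySem.Dict.keys_empty, PySem.Set.update_nil_left] at hk
    exact hk
  have hrows : rows.map (fun r => r.1) = E.map (fun ip => ip.2.1) := by
    have h := pvEnumFilterMap (fun _ => true) (fun r : Int × Int × String => r.1) rows 0
    simpa [hE] using h.symm
  rw [PySem.Dict.items_eq_map_keys (List.foldl pvBindex PySem.Dict.empty E) hnd PySem.Dict.empty,
    List.map_map, hkeys, hrows]
  apply List.map_congr_left
  intro c _
  simp only [Function.comp]
  rw [pvGetD_fold E PySem.Dict.empty c, PySem.Dict.getD_empty, pvInnerItems]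
  simp only [Prod.mk.injEq, true_and]
  have hpl : ((E.filter (fun ip => ip.2.1 == c)).map (fun ip => (ip.2.2.1, ip.1))).map Prod.fst
      = (rows.filter (fun r => r.1 == c)).map (fun r => r.2.1) := by
    rw [List.map_map]
    exact pvEnumFilterMap (fun r => r.1 == c) (fun r => r.2.1) rows 0
  rw [hpl]
  apply List.map_congr_left
  intro p _
  simp only [Prod.mk.injEq, true_and]
  simp only [List.filter_map, List.map_map, Function.comp, List.filter_filter]
  simp [Function.comp, Bool.and_comm]

-- ===== VERDICT (by name: the statement is the Claim_ definition above) =====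
theorem build_part_index_py_spec : Claim_equal_build_part_index_py := by
  intro data class_id part_id _ _
  unfold Spec_build_part_index_py
  have hA := pvLoopA_outer (PySem.Dict.ofList class_id) (PySem.Dict.ofList part_id) data
    PySem.Dict.empty []
  simp only [List.length_nil, Int.natCast_zero, List.nil_append, Nat.zero_add] at hA
  simp only [build_part_index_py, build_part_index_py_alt, hA,
    pvIndex_eq (data.flatMap (fun e => e.2.2.map (pvRowB (PySem.Dict.ofList class_id) (PySem.Dict.ofList part_id))))]
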